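-- pv_equiv track=rewrite | github.com/sykwon/teddy-dream | dream/src/util.py | perm_to_idx
-- ===== SOURCE A (Python) =====
-- def perm_to_idx(perm):
--     output = []
--     pos = 1
--     for str_type in perm:
--         if str_type == 0:
--             output.append(pos)
--             pos += 1
--         elif str_type == 1:
--             pos += 1
--         elif str_type == 2:
--             output.append(0)
--             pos += 1
--         elif str_type == 3:
--             output.append(0)
--     return output
-- ===== SOURCE B (Python) =====
-- def perm_to_idx(perm):
--     p = list(perm)
--     # first pass: prefix table of the position aligned to each element
--     pos = []
--     cur = 1
--     for x in p:
--         pos.append(cur)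
--         cur += 1 if x in (0, 1, 2) else 0
--     # second pass: select from the table
--     return [q if x == 0 else 0 for x, q in zip(p, pos) if x in (0, 2, 3)]
-- ===== Notes on version B (the rewrite author's own statement) =====
-- stated objective: alternative
-- what changed: Replaces A's single stateful counter loop by a two-pass table-build-then-select decomposition: one pass materializes the position prefix table, a second pass zips elements with their precomputed position and selects the output entries.
import Mathlib
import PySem

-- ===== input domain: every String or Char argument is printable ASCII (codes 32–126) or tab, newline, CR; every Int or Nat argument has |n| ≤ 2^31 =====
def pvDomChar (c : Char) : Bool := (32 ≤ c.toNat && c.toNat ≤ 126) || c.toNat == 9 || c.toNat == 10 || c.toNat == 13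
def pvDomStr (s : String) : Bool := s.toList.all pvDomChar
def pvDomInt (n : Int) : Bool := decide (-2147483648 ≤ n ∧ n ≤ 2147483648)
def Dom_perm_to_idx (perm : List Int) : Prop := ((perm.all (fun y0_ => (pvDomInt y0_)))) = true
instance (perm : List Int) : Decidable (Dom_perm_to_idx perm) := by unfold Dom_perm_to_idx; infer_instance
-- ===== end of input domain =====

-- B replaces A's single stateful counter loop by a two-pass table-build-then-select
-- decomposition (alternative structure, same O(n) cost).

-- ===== PORT A =====
-- A's loop over perm with state (output, pos)
def permLoopA : List Int → List Int → Int → List Int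
  | [], output, _ => output
  | x :: xs, output, pos =>
    if x = 0 then permLoopA xs (output ++ [pos]) (pos + 1)
    else if x = 1 then permLoopA xs output (pos + 1)
    else if x = 2 then permLoopA xs (output ++ [0]) (pos + 1)
    else if x = 3 then permLoopA xs (output ++ [0]) pos
    else permLoopA xs output pos

def perm_to_idx (perm : List Int) : List Int := permLoopA perm [] 1

-- ===== PORT B =====
-- first pass of B: the position prefix table, one entry aligned with each element
def buildPos : List Int → Int → List Int
  | [], _ => []
  | x :: xs, cur =>
    cur :: buildPos xs (cur + if x == 0 || x == 1 || x == 2 then 1 else 0)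

def perm_to_idx_alt (perm : List Int) : List Int :=
  let pos := buildPos perm 1
  ((perm.zip pos).filter (fun xq => xq.1 == 0 || xq.1 == 2 || xq.1 == 3)).map
    (fun xq => if xq.1 == 0 then xq.2 else 0)

-- ===== PRECONDITION & SPEC =====
def Spec_perm_to_idx (perm : List Int) (out : List Int) : Prop := out = perm_to_idx_alt perm
instance (perm : List Int) (out : List Int) : Decidable (Spec_perm_to_idx perm out) := by unfold Spec_perm_to_idx; infer_instance

-- ===== CLAIM (what is proved, stated in full; the proofs are below) =====
def Claim_equal_perm_to_idx : Prop := ∀ (perm : List Int), Dom_perm_to_idx perm → Spec_perm_to_idx perm (perm_to_idx perm)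

-- ===== LEMMAS AND PROOFS =====
lemma permLoopA_eq_alt (xs : List Int) : ∀ (out : List Int) (pos : Int),
    permLoopA xs out pos =
      out ++ ((xs.zip (buildPos xs pos)).filter (fun xq => xq.1 == 0 || xq.1 == 2 || xq.1 == 3)).map
        (fun xq => if xq.1 == 0 then xq.2 else 0) := by
  induction xs with
  | nil => intro out pos; simp [permLoopA, buildPos]
  | cons x xs ih =>
    intro out pos
    by_cases h0 : x = 0
    · subst h0; simp [permLoopA, buildPos, ih, List.append_assoc]
    · by_cases h1 : x = 1
      · subst h1; simp [permLoopA, buildPos, ih]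
      · by_cases h2 : x = 2
        · subst h2; simp [permLoopA, buildPos, ih, List.append_assoc]
        · by_cases h3 : x = 3
          · subst h3; simp [permLoopA, buildPos, ih, List.append_assoc]
          · simp [permLoopA, buildPos, ih, h0, h1, h2, h3]

-- ===== VERDICT (by name: the statement is the Claim_ definition above) =====
theorem perm_to_idx_spec : Claim_equal_perm_to_idx := by
  intro perm _
  show perm_to_idx perm = perm_to_idx_alt perm
  simp [perm_to_idx, perm_to_idx_alt, permLoopA_eq_alt]
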